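-- pv_equiv track=rewrite | github.com/inaciovasquez2020/chronos-urf-rr | toolkit/oblivion/scripts/local_cycle_rank_distribution.py | cycle_rank
-- ===== SOURCE A (Python) =====
-- def cycle_rank(adj,nodes):
--     S=set(nodes)
--     edges=0
--     for u in nodes:
--         for v in adj[u]:
--             if v in S:
--                 edges+=1
--     edges//=2
--     verts=len(nodes)
--
--     seen=set()
--     comp=0
--     for v in nodes:
--         if v in seen: continue
--         comp+=1
--         q=[v]
--         seen.add(v)
--         while q:
--             x=q.pop()
--             for y in adj[x]:
--                 if y in S and y not in seen:
--                     seen.add(y)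
--                     q.append(y)
--     return edges-verts+comp
-- ===== SOURCE B (Python) =====
-- def cycle_rank(adj, nodes):
--     S = set(nodes)
--     edges = sum(1 for u in nodes for v in adj[u] if v in S) // 2
--
--     def closure(v):
--         # Kleene fixpoint saturation: no worklist, whole-set rounds
--         R = {v}
--         while True:
--             nxt = {y for x in R for y in adj[x] if y in S}
--             if nxt <= R:
--                 return R
--             R |= nxt
--
--     seen = set()
--     comp = 0
--     for v in nodes:
--         if v not in seen:
--             comp += 1
--             seen |= closure(v)
--     return edges - len(nodes) + comp
-- ===== Notes on version B (the rewrite author's own statement) =====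
-- stated objective: alternative
-- what changed: Replaces A's interleaved stack-based restart-DFS (shared seen set mutated inside a pop-worklist) by a per-root Kleene fixpoint saturation: closure(v) recomputes the whole successor image of the current reachable set each round until it stops growing, and seen is only unioned with each finished closure; the edge-endpoint count becomes one generator-sum comprehension; proved: both component loops compute the least in-subgraph-closed set, hence the same count.
import Mathlib
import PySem

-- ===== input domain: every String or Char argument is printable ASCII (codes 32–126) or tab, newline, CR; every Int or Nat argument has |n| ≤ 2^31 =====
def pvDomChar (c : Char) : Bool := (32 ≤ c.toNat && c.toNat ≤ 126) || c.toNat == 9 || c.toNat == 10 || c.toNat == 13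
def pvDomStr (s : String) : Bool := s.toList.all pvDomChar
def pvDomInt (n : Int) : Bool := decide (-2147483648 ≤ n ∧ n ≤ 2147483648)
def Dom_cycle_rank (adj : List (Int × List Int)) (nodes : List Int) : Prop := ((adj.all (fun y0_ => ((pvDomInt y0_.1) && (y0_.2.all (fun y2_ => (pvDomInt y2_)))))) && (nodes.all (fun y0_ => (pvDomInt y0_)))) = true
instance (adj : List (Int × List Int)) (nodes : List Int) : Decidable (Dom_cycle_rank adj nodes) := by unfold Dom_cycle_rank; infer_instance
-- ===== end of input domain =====

-- B replaces A's interleaved stack-based restart-DFS by a per-root Kleene fixpoint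
-- saturation (whole-set rounds until the reachable set stops growing), unioned into
-- seen afterwards; objective: alternative (same result by a different algorithm).

-- shared accessor: adj[x] (Python dict lookup; total via default, Pre_ guards missing keys)
def pvSucc (adj : List (Int × List Int)) (x : Int) : List Int :=
  PySem.Dict.getD (PySem.Dict.mk adj) x []

-- termination measure: number of members of S not yet seen
def pvUnseen (S seen : List Int) : Nat :=
  (S.filter (fun t => decide (t ∉ seen))).length

theorem pvUnseen_mono (S s s' : List Int) (h : ∀ t, t ∈ s → t ∈ s') :
    pvUnseen S s' ≤ pvUnseen S s := by
  exact List.Sublist.length_le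
    (List.monotone_filter_right S (by intro a ha; simp_all; tauto))

theorem pvUnseen_lt (S s s' : List Int) (h : ∀ t, t ∈ s → t ∈ s')
    (y : Int) (hyS : y ∈ S) (hys : y ∉ s) (hys' : y ∈ s') :
    pvUnseen S s' < pvUnseen S s := by
  have hsub : List.Sublist (S.filter (fun t => decide (t ∉ s'))) (S.filter (fun t => decide (t ∉ s))) :=
    List.monotone_filter_right S (by intro a ha; simp_all; tauto)
  have hle := hsub.length_le
  rcases Nat.lt_or_ge (pvUnseen S s') (pvUnseen S s) with h' | h'
  · exact h'
  · exfalso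
    have heq : S.filter (fun t => decide (t ∉ s')) = S.filter (fun t => decide (t ∉ s)) :=
      hsub.eq_of_length (Nat.le_antisymm hle (by unfold pvUnseen at h'; omega))
    have hy1 : y ∈ S.filter (fun t => decide (t ∉ s)) := by simp [hys, hyS]
    rw [← heq] at hy1
    simp at hy1
    exact hy1.2 hys'

-- ===== PORT A =====
-- inner 'for y in adj[x]: if y in S and y not in seen: seen.add(y); q.append(y)'
-- (q is kept top-first, so Python's append is a cons here and pop() is head)
def pvPushA (S : List Int) (ys : List Int) (st : PySem.Set Int × List Int) :
    PySem.Set Int × List Int :=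
  ys.foldl (fun st y =>
    if y ∈ S ∧ y ∉ st.1 then (PySem.Set.add st.1 y, y :: st.2) else st) st

theorem pvPushA_term (S ys : List Int) (st : PySem.Set Int × List Int) :
    (∀ t, t ∈ st.1 → t ∈ (pvPushA S ys st).1) ∧
    pvUnseen S (pvPushA S ys st).1 + (pvPushA S ys st).2.length ≤
      pvUnseen S st.1 + st.2.length := by
  induction ys generalizing st with
  | nil => exact ⟨fun t h => h, le_refl _⟩
  | cons y ys ih =>
    simp only [pvPushA, List.foldl_cons] at *
    by_cases hc : y ∈ S ∧ y ∉ st.1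
    · simp only [if_pos hc]
      obtain ⟨ih1, ih2⟩ := ih (PySem.Set.add st.1 y, y :: st.2)
      refine ⟨fun t ht => ih1 t ?_, ?_⟩
      · simp [PySem.Set.mem_add]; exact Or.inl ht
      · have hdrop : pvUnseen S (PySem.Set.add st.1 y) < pvUnseen S st.1 :=
          pvUnseen_lt S st.1 _ (fun t ht => by simp [PySem.Set.mem_add]; exact Or.inl ht)
            y hc.1 hc.2 (by simp [PySem.Set.mem_add])
        simp only [List.length_cons] at ih2 ⊢
        omega
    · simp only [if_neg hc]
      exact ih st

-- the 'while q:' loop of A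
def pvStackLoopA (adj : List (Int × List Int)) (S : List Int) :
    List Int → PySem.Set Int → PySem.Set Int
  | [], seen => seen
  | x :: rest, seen =>
      let st := pvPushA S (pvSucc adj x) (seen, rest)
      pvStackLoopA adj S st.2 st.1
termination_by q seen => 2 * pvUnseen S seen + q.length
decreasing_by
  obtain ⟨h1, h2⟩ := pvPushA_term S (pvSucc adj x) (seen, rest)
  have h3 := pvUnseen_mono S seen (pvPushA S (pvSucc adj x) (seen, rest)).1
    (fun t ht => h1 t ht)
  simp only [List.length_cons]
  dsimp only at h2 ⊢
  omega

def cycle_rank (adj : List (Int × List Int)) (nodes : List Int) : Int :=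
  let S : PySem.Set Int := PySem.Set.ofList nodes
  let edges : Int := nodes.foldl (fun e u =>
    (pvSucc adj u).foldl (fun e v => if v ∈ S then e + 1 else e) e) 0
  let edges := PySem.Int.floordiv edges 2
  let verts : Int := nodes.length
  let r := nodes.foldl (fun (st : PySem.Set Int × Int) v =>
    if v ∈ st.1 then st
    else (pvStackLoopA adj S [v] (PySem.Set.add st.1 v), st.2 + 1))
    (PySem.Set.empty, 0)
  edges - verts + r.2

-- ===== PORT B =====
-- 'seen |= …' : union of a set with a list of candidates
def pvUnion (a : PySem.Set Int) (b : List Int) : PySem.Set Int :=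
  b.foldl PySem.Set.add a

-- '{y for x in R for y in adj[x] if y in S}': the one-round successor image
def pvNext (adj : List (Int × List Int)) (S : List Int) (R : PySem.Set Int) : List Int :=
  PySem.Set.ofList ((R.flatMap (fun x => pvSucc adj x)).filter (fun y => decide (y ∈ S)))

theorem pvUnion_mem (a : PySem.Set Int) (b : List Int) (t : Int) :
    t ∈ pvUnion a b ↔ t ∈ a ∨ t ∈ b := by
  induction b generalizing a with
  | nil => simp [pvUnion]
  | cons y b ih =>
    simp only [pvUnion, List.foldl_cons] at *
    rw [ih]
    simp [PySem.Set.mem_add]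
    tauto

theorem pvNext_mem (adj : List (Int × List Int)) (S : List Int) (R : PySem.Set Int) (y : Int) :
    y ∈ pvNext adj S R ↔ (∃ x ∈ R, y ∈ pvSucc adj x) ∧ y ∈ S := by
  simp [pvNext, PySem.Set.mem_ofList, List.mem_filter, List.mem_flatMap]

-- 'while True: nxt = …; if nxt <= R: return R; R |= nxt'  (Kleene saturation)
def pvClosure (adj : List (Int × List Int)) (S : List Int) (R : PySem.Set Int) :
    PySem.Set Int :=
  let nxt := pvNext adj S R
  if h : nxt.all (fun y => decide (y ∈ R)) = true then R
  else pvClosure adj S (pvUnion R nxt)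
termination_by pvUnseen S R
decreasing_by
  simp only [List.all_eq_true, decide_eq_true_eq] at h
  push Not at h
  obtain ⟨y, hy, hyR⟩ := h
  exact pvUnseen_lt S R _ (fun t ht => (pvUnion_mem R _ t).2 (Or.inl ht))
    y ((pvNext_mem adj S R y).1 hy).2 hyR ((pvUnion_mem R _ y).2 (Or.inr hy))

def cycle_rank_alt (adj : List (Int × List Int)) (nodes : List Int) : Int :=
  let S : PySem.Set Int := PySem.Set.ofList nodes
  let edges : Int := PySem.Int.floordiv
    (((nodes.flatMap (fun u => pvSucc adj u)).filter (fun v => decide (v ∈ S))).length : Int) 2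
  let r := nodes.foldl (fun (st : PySem.Set Int × Int) v =>
    if v ∉ st.1 then (pvUnion st.1 (pvClosure adj S (PySem.Set.ofList [v])), st.2 + 1)
    else st)
    (PySem.Set.empty, 0)
  edges - (nodes.length : Int) + r.2

-- ===== PRECONDITION & SPEC =====
-- Pre_ excludes exactly the inputs where Python A raises KeyError: some node is not a key of adj
def Pre_cycle_rank (adj : List (Int × List Int)) (nodes : List Int) : Prop :=
  ∀ u ∈ nodes, (PySem.Dict.mk adj).contains u = true
instance (adj : List (Int × List Int)) (nodes : List Int) : Decidable (Pre_cycle_rank adj nodes) := by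
  unfold Pre_cycle_rank; infer_instance

def pvWitness_cycle_rank : (List (Int × List Int)) × List Int :=
  ([(0, [1]), (1, [0]), (2, [])], [0, 1, 2])

def Spec_cycle_rank (adj : List (Int × List Int)) (nodes : List Int) (out : Int) : Prop := out = cycle_rank_alt adj nodes
instance (adj : List (Int × List Int)) (nodes : List Int) (out : Int) : Decidable (Spec_cycle_rank adj nodes out) := by unfold Spec_cycle_rank; infer_instance

-- ===== CLAIM (what is proved, stated in full; the proofs are below) =====
def Claim_equal_cycle_rank : Prop := ∀ (adj : List (Int × List Int)) (nodes : List Int), Dom_cycle_rank adj nodes → Pre_cycle_rank adj nodes → Spec_cycle_rank adj nodes (cycle_rank adj nodes)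

-- ===== LEMMAS AND PROOFS =====

-- 'seen is closed under in-subgraph successors'
def pvClosed (adj : List (Int × List Int)) (S : List Int) (s : List Int) : Prop :=
  ∀ x ∈ s, ∀ y ∈ pvSucc adj x, y ∈ S → y ∈ s

-- properties of the inner push fold of A
theorem pvPushA_props (S ys : List Int) (st : PySem.Set Int × List Int) :
    (∀ t, t ∈ st.2 → t ∈ (pvPushA S ys st).2) ∧
    (∀ y, y ∈ ys → y ∈ S → y ∈ (pvPushA S ys st).1) ∧
    (∀ t, t ∈ (pvPushA S ys st).1 → t ∈ st.1 ∨ t ∈ (pvPushA S ys st).2) ∧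
    (∀ t, t ∈ (pvPushA S ys st).2 → t ∈ st.2 ∨ (t ∈ S ∧ t ∈ (pvPushA S ys st).1)) := by
  induction ys generalizing st with
  | nil => exact ⟨fun t h => h, by simp, fun t h => Or.inl h, fun t h => Or.inl h⟩
  | cons y ys ih =>
    simp only [pvPushA, List.foldl_cons] at *
    by_cases hc : y ∈ S ∧ y ∉ st.1
    · simp only [if_pos hc]
      obtain ⟨ib, ic, id, ie⟩ := ih (PySem.Set.add st.1 y, y :: st.2)
      obtain ⟨ia, -⟩ := pvPushA_term S ys (PySem.Set.add st.1 y, y :: st.2)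
      simp only [pvPushA] at ia ib ic id ie
      refine ⟨fun t ht => ib t (by simp [ht]), ?_, ?_, ?_⟩
      · intro z hz hzS
        rcases List.mem_cons.1 hz with rfl | hz
        · exact ia z (by simp [PySem.Set.mem_add])
        · exact ic z hz hzS
      · intro t ht
        rcases id t ht with h | h
        · rw [PySem.Set.mem_add] at h
          rcases h with h | rfl
          · exact Or.inl h
          · exact Or.inr (ib t (by simp))
        · exact Or.inr h
      · intro t ht
        rcases ie t ht with h | h
        · rcases List.mem_cons.1 h with rfl | h
          · exact Or.inr ⟨hc.1, ia t (by simp [PySem.Set.mem_add])⟩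
          · exact Or.inl h
        · exact Or.inr h
    · simp only [if_neg hc]
      obtain ⟨ib, ic, id, ie⟩ := ih st
      obtain ⟨ia, -⟩ := pvPushA_term S ys st
      simp only [pvPushA] at ia
      refine ⟨ib, ?_, id, ie⟩
      intro z hz hzS
      rcases List.mem_cons.1 hz with rfl | hz
      · refine ia z ?_
        by_contra h
        exact hc ⟨hzS, h⟩
      · exact ic z hz hzS

-- everything the push fold of A produces stays inside a closed superset T
theorem pvPushA_sub (S ys : List Int) (st : PySem.Set Int × List Int) (T : List Int)
    (hys : ∀ y ∈ ys, y ∈ S → y ∈ T)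
    (h1 : ∀ t ∈ st.1, t ∈ T) (h2 : ∀ t ∈ st.2, t ∈ T) :
    (∀ t ∈ (pvPushA S ys st).1, t ∈ T) ∧ (∀ t ∈ (pvPushA S ys st).2, t ∈ T) := by
  induction ys generalizing st with
  | nil => exact ⟨h1, h2⟩
  | cons y ys ih =>
    simp only [pvPushA, List.foldl_cons] at *
    by_cases hc : y ∈ S ∧ y ∉ st.1
    · simp only [if_pos hc]
      have hyT : y ∈ T := hys y List.mem_cons_self hc.1
      refine ih (PySem.Set.add st.1 y, y :: st.2)
        (fun z hz hzS => hys z (List.mem_cons_of_mem _ hz) hzS) ?_ ?_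
      · intro t ht
        rw [PySem.Set.mem_add] at ht
        rcases ht with h | rfl
        · exact h1 t h
        · exact hyT
      · intro t ht
        rcases List.mem_cons.1 ht with rfl | h
        · exact hyT
        · exact h2 t h
    · simp only [if_neg hc]
      exact ih st (fun z hz hzS => hys z (List.mem_cons_of_mem _ hz) hzS) h1 h2

-- soundness of A's while loop: the final seen contains seen and is closed
theorem pvStackA_sound (adj : List (Int × List Int)) (S : List Int) :
    ∀ (q : List Int) (seen : PySem.Set Int),
    (∀ t ∈ q, t ∈ seen) →
    (∀ x ∈ seen, x ∉ q → ∀ y ∈ pvSucc adj x, y ∈ S → y ∈ seen) →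
    (∀ t ∈ seen, t ∈ pvStackLoopA adj S q seen) ∧
      pvClosed adj S (pvStackLoopA adj S q seen) := by
  intro q seen
  induction q, seen using pvStackLoopA.induct adj S with
  | case1 seen =>
    intro _ hcl
    rw [pvStackLoopA]
    exact ⟨fun t h => h, fun x hx y hy hyS => hcl x hx (by simp) y hy hyS⟩
  | case2 x rest seen st ih =>
    intro hq hcl
    rw [pvStackLoopA]
    obtain ⟨pa, -⟩ := pvPushA_term S (pvSucc adj x) (seen, rest)
    obtain ⟨pb, pc, pd, pe⟩ := pvPushA_props S (pvSucc adj x) (seen, rest)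
    have hq' : ∀ t ∈ st.2, t ∈ st.1 := by
      intro t ht
      rcases pe t ht with h | h
      · exact pa t (hq t (List.mem_cons_of_mem _ h))
      · exact h.2
    have hcl' : ∀ z ∈ st.1, z ∉ st.2 → ∀ y ∈ pvSucc adj z, y ∈ S → y ∈ st.1 := by
      intro z hz hznq y hy hyS
      rcases pd z hz with hzs | hzq
      · by_cases hzx : z = x
        · subst hzx; exact pc y hy hyS
        · have hzrest : z ∉ rest := fun h => hznq (pb z h)
          have : z ∉ (x :: rest) := by simp [hzx, hzrest]
          exact pa y (hcl z hzs this y hy hyS)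
      · exact absurd hzq hznq
    obtain ⟨r1, r2⟩ := ih hq' hcl'
    exact ⟨fun t ht => r1 t (pa t ht), r2⟩

-- minimality of A's while loop: the final seen lies inside any closed superset
theorem pvStackA_min (adj : List (Int × List Int)) (S : List Int) :
    ∀ (q : List Int) (seen : PySem.Set Int) (T : List Int),
    pvClosed adj S T → (∀ t ∈ q, t ∈ T) → (∀ t ∈ seen, t ∈ T) →
    ∀ t ∈ pvStackLoopA adj S q seen, t ∈ T := by
  intro q seen
  induction q, seen using pvStackLoopA.induct adj S with
  | case1 seen =>
    intro T _ _ hseen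
    rw [pvStackLoopA]; exact hseen
  | case2 x rest seen st ih =>
    intro T hT hqT hseenT
    rw [pvStackLoopA]
    have hsub := pvPushA_sub S (pvSucc adj x) (seen, rest) T
      (fun y hy hyS => hT x (hqT x (by simp)) y hy hyS)
      hseenT (fun t ht => hqT t (List.mem_cons_of_mem _ ht))
    exact ih T hT hsub.2 hsub.1

-- soundness of B's saturation: it contains its seed and is closed
theorem pvClosure_sound (adj : List (Int × List Int)) (S : List Int) :
    ∀ (R : PySem.Set Int),
    (∀ t ∈ R, t ∈ pvClosure adj S R) ∧ pvClosed adj S (pvClosure adj S R) := by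
  intro R
  induction R using pvClosure.induct adj S with
  | case1 R nxt h =>
    have h' : ((pvNext adj S R).all fun y => decide (y ∈ R)) = true := h
    rw [pvClosure, dif_pos h']
    simp only [List.all_eq_true, decide_eq_true_eq] at h'
    refine ⟨fun t ht => ht, ?_⟩
    intro x hx y hy hyS
    exact h' y ((pvNext_mem adj S R y).2 ⟨⟨x, hx, hy⟩, hyS⟩)
  | case2 R nxt h ih =>
    have h' : ¬ ((pvNext adj S R).all fun y => decide (y ∈ R)) = true := h
    rw [pvClosure, dif_neg h']
    exact ⟨fun t ht => ih.1 t ((pvUnion_mem R (pvNext adj S R) t).2 (Or.inl ht)), ih.2⟩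

-- minimality of B's saturation: it lies inside any closed superset of its seed
theorem pvClosure_min (adj : List (Int × List Int)) (S : List Int) :
    ∀ (R : PySem.Set Int) (T : List Int),
    pvClosed adj S T → (∀ t ∈ R, t ∈ T) → ∀ t ∈ pvClosure adj S R, t ∈ T := by
  intro R
  induction R using pvClosure.induct adj S with
  | case1 R nxt h =>
    intro T _ hRT
    have h' : ((pvNext adj S R).all fun y => decide (y ∈ R)) = true := h
    rw [pvClosure, dif_pos h']
    exact hRT
  | case2 R nxt h ih =>
    intro T hT hRT
    have h' : ¬ ((pvNext adj S R).all fun y => decide (y ∈ R)) = true := h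
    rw [pvClosure, dif_neg h']
    refine ih T hT ?_
    intro t ht
    rcases (pvUnion_mem R (pvNext adj S R) t).1 ht with hu | hu
    · exact hRT t hu
    · obtain ⟨⟨x, hx, hsucc⟩, htS⟩ := (pvNext_mem adj S R t).1 hu
      exact hT x (hRT x hx) t hsucc htS

-- a union of two closed sets is closed
theorem pvClosed_union (adj : List (Int × List Int)) (S : List Int)
    (a : PySem.Set Int) (b : List Int) (ha : pvClosed adj S a) (hb : pvClosed adj S b) :
    pvClosed adj S (pvUnion a b) := by
  intro x hx y hy hyS
  rcases (pvUnion_mem a b x).1 hx with h | h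
  · exact (pvUnion_mem a b y).2 (Or.inl (ha x h y hy hyS))
  · exact (pvUnion_mem a b y).2 (Or.inr (hb x h y hy hyS))

-- A's restart step and B's restart step produce the same seen (as sets), both closed
theorem pvStepsAgree (adj : List (Int × List Int)) (S : List Int)
    (sA sB : PySem.Set Int) (hmem : ∀ t, t ∈ sA ↔ t ∈ sB)
    (hcA : pvClosed adj S sA) (hcB : pvClosed adj S sB) (v : Int) :
    (∀ t, t ∈ pvStackLoopA adj S [v] (PySem.Set.add sA v) ↔
          t ∈ pvUnion sB (pvClosure adj S (PySem.Set.ofList [v]))) ∧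
    pvClosed adj S (pvStackLoopA adj S [v] (PySem.Set.add sA v)) ∧
    pvClosed adj S (pvUnion sB (pvClosure adj S (PySem.Set.ofList [v]))) := by
  have hvC : v ∈ pvClosure adj S (PySem.Set.ofList [v]) :=
    (pvClosure_sound adj S (PySem.Set.ofList [v])).1 v (by simp [PySem.Set.mem_ofList])
  have hcC := (pvClosure_sound adj S (PySem.Set.ofList [v])).2
  have hcB' := pvClosed_union adj S sB _ hcB hcC
  have hqA : ∀ t ∈ [v], t ∈ PySem.Set.add sA v := by simp [PySem.Set.mem_add]
  have hclA : ∀ x ∈ PySem.Set.add sA v, x ∉ [v] → ∀ y ∈ pvSucc adj x, y ∈ S → y ∈ PySem.Set.add sA v := by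
    intro x hx hxv y hy hyS
    rw [PySem.Set.mem_add] at hx
    rcases hx with hx | rfl
    · rw [PySem.Set.mem_add]; exact Or.inl (hcA x hx y hy hyS)
    · simp at hxv
  obtain ⟨sndA1, sndA2⟩ := pvStackA_sound adj S [v] (PySem.Set.add sA v) hqA hclA
  refine ⟨fun t => ⟨?_, ?_⟩, sndA2, hcB'⟩
  · intro ht
    refine pvStackA_min adj S [v] (PySem.Set.add sA v) _ hcB' ?_ ?_ t ht
    · intro z hz
      rw [List.mem_singleton] at hz; subst hz
      exact (pvUnion_mem sB _ z).2 (Or.inr hvC)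
    · intro z hz
      rw [PySem.Set.mem_add] at hz
      rcases hz with hz | rfl
      · exact (pvUnion_mem sB _ z).2 (Or.inl ((hmem z).1 hz))
      · exact (pvUnion_mem sB _ z).2 (Or.inr hvC)
  · intro ht
    rcases (pvUnion_mem sB _ t).1 ht with h | h
    · exact sndA1 t (by rw [PySem.Set.mem_add]; exact Or.inl ((hmem t).2 h))
    · refine pvClosure_min adj S (PySem.Set.ofList [v]) _ sndA2 ?_ t h
      intro z hz
      rw [PySem.Set.mem_ofList, List.mem_singleton] at hz; subst hz
      exact sndA1 z (by rw [PySem.Set.mem_add]; exact Or.inr rfl)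

-- the outer restart folds produce the same component count
theorem pvFoldAgree (adj : List (Int × List Int)) (S : List Int) :
    ∀ (l : List Int) (sA sB : PySem.Set Int) (c : Int),
    (∀ t, t ∈ sA ↔ t ∈ sB) → pvClosed adj S sA → pvClosed adj S sB →
    (l.foldl (fun (st : PySem.Set Int × Int) v =>
        if v ∈ st.1 then st
        else (pvStackLoopA adj S [v] (PySem.Set.add st.1 v), st.2 + 1)) (sA, c)).2 =
    (l.foldl (fun (st : PySem.Set Int × Int) v =>
        if v ∉ st.1 then (pvUnion st.1 (pvClosure adj S (PySem.Set.ofList [v])), st.2 + 1)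
        else st) (sB, c)).2 := by
  intro l
  induction l with
  | nil => intro sA sB c _ _ _; rfl
  | cons v l ih =>
    intro sA sB c hmem hcA hcB
    simp only [List.foldl_cons]
    by_cases hv : v ∈ sA
    · rw [if_pos hv, if_neg (fun h => h ((hmem v).1 hv))]
      exact ih sA sB c hmem hcA hcB
    · rw [if_neg hv, if_pos (fun h => hv ((hmem v).2 h))]
      obtain ⟨hm, hc1, hc2⟩ := pvStepsAgree adj S sA sB hmem hcA hcB v
      exact ih _ _ (c + 1) hm hc1 hc2

-- the edge count of A equals B's comprehension count
theorem pvInnerCount (S : List Int) (ys : List Int) :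
    ∀ (e : Int), ys.foldl (fun e v => if v ∈ S then e + 1 else e) e =
      e + ((ys.filter (fun v => decide (v ∈ S))).length : Int) := by
  induction ys with
  | nil => intro e; simp
  | cons y ys ih =>
    intro e
    simp only [List.foldl_cons, List.filter_cons]
    by_cases hy : y ∈ S
    · rw [if_pos hy, ih]
      simp only [hy, decide_true, if_true, List.length_cons]
      push_cast
      ring
    · rw [if_neg hy, ih]
      simp [hy]

theorem pvEdgesAgree (adj : List (Int × List Int)) (S : List Int) :
    ∀ (l : List Int) (e : Int),
    l.foldl (fun e u => (pvSucc adj u).foldl (fun e v => if v ∈ S then e + 1 else e) e) e =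
    e + (((l.flatMap (fun u => pvSucc adj u)).filter (fun v => decide (v ∈ S))).length : Int) := by
  intro l
  induction l with
  | nil => intro e; simp
  | cons u l ih =>
    intro e
    simp only [List.foldl_cons, List.flatMap_cons, List.filter_append, List.length_append]
    rw [pvInnerCount, ih]
    push_cast
    ring

-- ===== VERDICT (by name: the statement is the Claim_ definition above) =====
theorem cycle_rank_spec : Claim_equal_cycle_rank := by
  intro adj nodes _ _
  unfold Spec_cycle_rank cycle_rank cycle_rank_alt
  simp only []
  rw [pvEdgesAgree adj (PySem.Set.ofList nodes) nodes 0]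
  rw [pvFoldAgree adj (PySem.Set.ofList nodes) nodes PySem.Set.empty PySem.Set.empty 0
    (fun t => Iff.rfl) (by intro x hx; simp at hx)
    (by intro x hx; simp at hx)]
  simp only [zero_add]
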